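-- pv_equiv track=rewrite | github.com/willyg302/Sagittarius | app-engine/encrypt.py | padstring
-- ===== SOURCE A (Python) =====
-- def padstring(text, key, pad):
-- 	ret = ''
-- 	seed = 0
-- 	for i in range(0, len(key)):
-- 		seed += (ord(key[i]) * (1 << i))
-- 	seed *= pad
-- 	for i in range(0, len(text)):
-- 		seed = ((seed * 214013 + 2531011) >> 16) & 0x7fff
-- 		ret += chr(ord(text[i]) ^ (seed & 0xff))
-- 	return ret
-- ===== SOURCE B (Python) =====
-- def padstring(text, key, pad):
--     # Horner evaluation of the little-endian base-2 key digest
--     seed = 0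
--     for ch in reversed(key):
--         seed = seed * 2 + ord(ch)
--     seed *= pad
--     if not text:
--         return ''
--     # after the first step the LCG state is 15-bit: drive it by a precomputed table
--     nxt = [((s * 214013 + 2531011) >> 16) & 0x7fff for s in range(1 << 15)]
--     state = ((seed * 214013 + 2531011) >> 16) & 0x7fff
--     out = [chr(ord(text[0]) ^ (state & 0xff))]
--     for c in text[1:]:
--         state = nxt[state]
--         out.append(chr(ord(c) ^ (state & 0xff)))
--     return ''.join(out)
-- ===== Notes on version B (the rewrite author's own statement) =====
-- stated objective: alternative
-- what changed: B derives the seed by Horner evaluation over the reversed key instead of per-index shifts, and replaces A's per-character LCG arithmetic by a precomputed 32768-entry transition table over the 15-bit state (only the first step is computed from the full seed), collecting output characters in a list joined at the end.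
import Mathlib
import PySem

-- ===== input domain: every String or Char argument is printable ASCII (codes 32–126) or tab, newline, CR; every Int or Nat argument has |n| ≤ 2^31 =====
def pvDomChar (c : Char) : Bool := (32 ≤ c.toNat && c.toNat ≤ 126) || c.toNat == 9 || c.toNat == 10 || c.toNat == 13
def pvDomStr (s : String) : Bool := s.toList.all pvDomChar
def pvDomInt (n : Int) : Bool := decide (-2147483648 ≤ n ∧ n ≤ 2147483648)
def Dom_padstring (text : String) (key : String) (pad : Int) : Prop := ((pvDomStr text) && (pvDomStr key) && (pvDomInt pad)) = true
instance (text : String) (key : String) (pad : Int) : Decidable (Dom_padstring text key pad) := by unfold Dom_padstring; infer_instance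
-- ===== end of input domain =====

-- B replaces A's per-index-shift seed loop by Horner evaluation of the reversed key and drives
-- the stream by a precomputed 32768-entry transition table over the 15-bit LCG state
-- (objective: alternative algorithmic mechanism, not claimed faster).

-- ===== PORT A =====
-- literal transliteration of A: index loop deriving the seed, then one fused loop
-- advancing the LCG and appending each XOR-ed character to the accumulated string.
def padstring (text : String) (key : String) (pad : Int) : String :=
  let seed0 : Int :=
    (PySem.List.pyRange 0 (PySem.Str.len key) 1).foldl
      (fun seed i =>
        seed + ((PySem.List.pyGetD key.toList i 'a').toNat : Int) * ((1 : Int) <<< i.toNat)) 0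
  let seed1 := seed0 * pad
  let st :=
    (PySem.List.pyRange 0 (PySem.Str.len text) 1).foldl
      (fun (p : List Char × Int) i =>
        let s := PySem.Int.band ((p.2 * 214013 + 2531011) >>> 16) 0x7fff
        (p.1 ++ [Char.ofNat (PySem.Int.bxor ((PySem.List.pyGetD text.toList i 'a').toNat : Int)
                              (PySem.Int.band s 0xff)).toNat], s))
      ([], seed1)
  String.ofList st.1

-- ===== PORT B =====
-- literal transliteration of B: Horner fold over the reversed key, empty-text early return,
-- precomputed 15-bit transition table, first LCG step from the full seed, then table-driven loop.
def padstring_alt (text : String) (key : String) (pad : Int) : String :=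
  let seed : Int := (key.toList.reverse.foldl (fun a c => a * 2 + (c.toNat : Int)) 0) * pad
  match text.toList with
  | [] => ""
  | c0 :: rest =>
    let nxt : List Int :=
      (PySem.List.pyRange 0 32768).map
        (fun s : Int => PySem.Int.band ((s * 214013 + 2531011) >>> 16) 0x7fff)
    let state0 := PySem.Int.band ((seed * 214013 + 2531011) >>> 16) 0x7fff
    let st :=
      rest.foldl
        (fun (p : List Char × Int) c =>
          let t := PySem.List.pyGetD nxt p.2 0
          (p.1 ++ [Char.ofNat (PySem.Int.bxor ((c.toNat : Int)) (PySem.Int.band t 0xff)).toNat], t))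
        ([Char.ofNat (PySem.Int.bxor ((c0.toNat : Int)) (PySem.Int.band state0 0xff)).toNat], state0)
    String.ofList st.1

-- ===== PRECONDITION & SPEC =====
def Spec_padstring (text : String) (key : String) (pad : Int) (out : String) : Prop := out = padstring_alt text key pad
instance (text : String) (key : String) (pad : Int) (out : String) : Decidable (Spec_padstring text key pad out) := by unfold Spec_padstring; infer_instance

-- ===== CLAIM =====
def Claim_equal_padstring : Prop := ∀ (text : String) (key : String) (pad : Int), Dom_padstring text key pad → Spec_padstring text key pad (padstring text key pad)

-- ===== LEMMAS AND PROOFS =====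

-- one LCG step
def pvStep (s : Int) : Int := PySem.Int.band ((s * 214013 + 2531011) >>> 16) 0x7fff

-- seed after n steps
def pvLast (s : Int) : Nat → Int
  | 0 => s
  | n + 1 => pvLast (pvStep s) n

-- reference encryption of a char list from a given state
def pvGo : List Char → Int → List Char
  | [], _ => []
  | c :: cs, s =>
    let t := pvStep s
    Char.ofNat (PySem.Int.bxor ((c.toNat : Int)) (PySem.Int.band t 0xff)).toNat :: pvGo cs t

-- reference seed digest: sum ord(key[i]) * 2^i
def pvSeedSpec : List Char → Int
  | [] => 0
  | c :: cs => (c.toNat : Int) + 2 * pvSeedSpec cs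

lemma pv_step_bounds (s : Int) : 0 ≤ pvStep s ∧ pvStep s < 32768 := by
  unfold pvStep PySem.Int.band
  set x := (s * 214013 + 2531011) >>> 16 with hx
  have h0 : ((0x7fff : Int)).toNat = 32767 := rfl
  split_ifs with h1 h2 h2
  · rw [h0]
    have h := Nat.and_le_right (n := x.toNat) (m := 32767)
    exact ⟨by positivity, by exact_mod_cast Nat.lt_succ_of_le h⟩
  · omega
  · rw [h0]
    have h : 32767 - (32767 &&& (-x - 1).toNat) ≤ 32767 := Nat.sub_le _ _
    exact ⟨by positivity, by exact_mod_cast Nat.lt_succ_of_le h⟩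
  · omega

-- pvSeedSpec on an appended last char
lemma pv_seedSpec_append (l : List Char) (x : Char) :
    pvSeedSpec (l ++ [x]) = pvSeedSpec l + (x.toNat : Int) * 2 ^ l.length := by
  induction l with
  | nil => simp [pvSeedSpec]
  | cons c cs ih =>
    simp only [List.cons_append, pvSeedSpec, ih, List.length_cons]
    ring

-- A's seed-derivation fold computes pvSeedSpec
lemma pv_seed_A (l : List Char) :
    (PySem.List.pyRange 0 (l.length : Int) 1).foldl
      (fun seed i => seed + ((PySem.List.pyGetD l i 'a').toNat : Int) * ((1 : Int) <<< i.toNat)) 0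
    = pvSeedSpec l := by
  induction l using List.reverseRecOn with
  | nil => simp [PySem.List.pyRange_one_eq_nil, pvSeedSpec]
  | append_singleton l x ih =>
    have hlen : ((l ++ [x]).length : Int) = (l.length : Int) + 1 := by simp
    rw [hlen, PySem.List.pyRange_one_succ_right (by positivity), List.foldl_append]
    have hcongr :
        (PySem.List.pyRange 0 (l.length : Int) 1).foldl
          (fun seed i => seed + ((PySem.List.pyGetD (l ++ [x]) i 'a').toNat : Int) * ((1 : Int) <<< i.toNat)) 0
        = (PySem.List.pyRange 0 (l.length : Int) 1).foldl
          (fun seed i => seed + ((PySem.List.pyGetD l i 'a').toNat : Int) * ((1 : Int) <<< i.toNat)) 0 := by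
      apply PySem.List.foldl_congr_mem
      intro acc i hi
      rw [PySem.List.mem_pyRange_one] at hi
      have hlt : i.toNat < l.length := by omega
      rw [PySem.List.pyGetD_of_nonneg _ _ hi.1, PySem.List.pyGetD_of_nonneg _ _ hi.1,
        List.getD_eq_getElem?_getD, List.getD_eq_getElem?_getD,
        List.getElem?_append_left hlt]
    rw [hcongr, ih, pv_seedSpec_append]
    have hx : PySem.List.pyGetD (l ++ [x]) (l.length : Int) 'a' = x := by
      rw [PySem.List.pyGetD_of_nonneg _ _ (by positivity)]
      simp
    simp [hx, Int.shiftLeft_eq]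

-- B's Horner fold over the reversed list computes pvSeedSpec (generalized accumulator)
lemma pv_seed_B (l : List Char) (a : Int) :
    l.reverse.foldl (fun a c => a * 2 + (c.toNat : Int)) a
    = a * 2 ^ l.length + pvSeedSpec l := by
  induction l generalizing a with
  | nil => simp [pvSeedSpec]
  | cons c cs ih =>
    simp only [List.reverse_cons, List.foldl_append, List.foldl_cons, List.foldl_nil,
      ih, pvSeedSpec, List.length_cons]
    ring

-- A's fused loop produces pvGo
lemma pv_fused_fold (cs : List Char) (acc : List Char) (s : Int) :
    cs.foldl
      (fun (p : List Char × Int) c =>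
        let t := pvStep p.2
        (p.1 ++ [Char.ofNat (PySem.Int.bxor ((c.toNat : Int)) (PySem.Int.band t 0xff)).toNat], t))
      (acc, s)
    = (acc ++ pvGo cs s, pvLast s cs.length) := by
  induction cs generalizing acc s with
  | nil => simp [pvGo, pvLast]
  | cons c cs ih =>
    simp only [List.foldl_cons, ih, pvGo, pvLast, List.length_cons]
    simp

-- B's table-driven loop also produces pvGo, given a 15-bit starting state
lemma pv_table_fold (cs : List Char) (acc : List Char) (s : Int)
    (hs : 0 ≤ s ∧ s < 32768) :
    cs.foldl
      (fun (p : List Char × Int) c =>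
        let t := PySem.List.pyGetD
          ((PySem.List.pyRange 0 32768).map
            (fun s : Int => PySem.Int.band ((s * 214013 + 2531011) >>> 16) 0x7fff)) p.2 0
        (p.1 ++ [Char.ofNat (PySem.Int.bxor ((c.toNat : Int)) (PySem.Int.band t 0xff)).toNat], t))
      (acc, s)
    = (acc ++ pvGo cs s, pvLast s cs.length) := by
  induction cs generalizing acc s with
  | nil => simp [pvGo, pvLast]
  | cons c cs ih =>
    have hlook : PySem.List.pyGetD
        ((PySem.List.pyRange 0 32768).map
          (fun s : Int => PySem.Int.band ((s * 214013 + 2531011) >>> 16) 0x7fff)) s 0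
        = pvStep s :=
      PySem.List.pyGetD_map_pyRange_of_nonneg _ 32768 s 0 hs.1 hs.2
    simp only [List.foldl_cons, hlook, ih _ _ (pv_step_bounds s), pvGo, pvLast, List.length_cons]
    simp

-- ===== VERDICT =====
theorem padstring_spec : Claim_equal_padstring := by
  intro text key pad _
  unfold Spec_padstring padstring padstring_alt
  simp only [PySem.Str.len_eq]
  rw [pv_seed_A, pv_seed_B, zero_mul, zero_add]
  rw [show (fun (p : List Char × Int) i =>
        let s := PySem.Int.band ((p.2 * 214013 + 2531011) >>> 16) 0x7fff
        (p.1 ++ [Char.ofNat (PySem.Int.bxor ((PySem.List.pyGetD text.toList i 'a').toNat : Int)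
                              (PySem.Int.band s 0xff)).toNat], s))
      = (fun (p : List Char × Int) i =>
          (fun (p : List Char × Int) c =>
            let t := pvStep p.2
            (p.1 ++ [Char.ofNat (PySem.Int.bxor ((c.toNat : Int)) (PySem.Int.band t 0xff)).toNat], t))
          p (PySem.List.pyGetD text.toList i 'a')) from rfl]
  rw [PySem.List.foldl_pyRange_zero_pyGetD' text.toList 'a'
      (fun (p : List Char × Int) c =>
        let t := pvStep p.2
        (p.1 ++ [Char.ofNat (PySem.Int.bxor ((c.toNat : Int)) (PySem.Int.band t 0xff)).toNat], t))]
  rw [pv_fused_fold]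
  cases htext : text.toList with
  | nil => simp [pvGo]
  | cons c0 rest =>
    have hstate : PySem.Int.band ((pvSeedSpec key.toList * pad * 214013 + 2531011) >>> 16) 0x7fff
        = pvStep (pvSeedSpec key.toList * pad) := rfl
    simp only [hstate]
    rw [pv_table_fold rest _ (pvStep (pvSeedSpec key.toList * pad))
        (pv_step_bounds _)]
    simp [pvGo]
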